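-- pv_equiv track=rewrite | github.com/StefanPej/advent_of_code | 2023/day_14/part_02.py | cha_cha_slide
-- ===== SOURCE A (Python) =====
-- def cha_cha_slide(row, reverse=False):
--     row = list(row)
--     if not reverse:
--         for i in range(len(row)):
--             if row[i] == 'O':
--                 current_pos = i
--                 next_pos = i-1
--                 while current_pos > 0 and next_pos > -1:
--                     if row[next_pos] in ['0', '#']:
--                         break
--                     row[current_pos], row[next_pos] = row[next_pos], row[current_pos]
--                     current_pos -= 1
--                     next_pos -= 1
--     else:
--         for i in range(len(row)-1, -1, -1):
--             if row[i] == 'O':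
--                 current_pos = i
--                 next_pos = i+1
--                 while current_pos <len(row)-1 and next_pos < len(row):
--                     if row[next_pos] in ['0', '#']:
--                         break
--                     row[current_pos], row[next_pos] = row[next_pos], row[current_pos]
--                     current_pos += 1
--                     next_pos += 1
--
--     return row
-- ===== SOURCE B (Python) =====
-- def cha_cha_slide(row, reverse=False):
--     out = []
--     seg = []
--     def flush():
--         n = seg.count('O')
--         rest = [c for c in seg if c != 'O']
--         if reverse:
--             out.extend(rest)
--             out.extend(['O'] * n)
--         else:
--             out.extend(['O'] * n)
--             out.extend(rest)
--         seg.clear()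
--     for c in row:
--         if c in ('0', '#'):
--             flush()
--             out.append(c)
--         else:
--             seg.append(c)
--     flush()
--     return out
-- ===== Notes on version B (the rewrite author's own statement) =====
-- stated objective: alternative
-- what changed: Replaces the per-rock bubble-swap loops (each 'O' is swapped step by step toward the end) with a single pass that splits the row at wall cells ('0'/'#') and emits each segment as its packed form: count of 'O' rocks placed at the tilted end, other cells kept in order.
import Mathlib
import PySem

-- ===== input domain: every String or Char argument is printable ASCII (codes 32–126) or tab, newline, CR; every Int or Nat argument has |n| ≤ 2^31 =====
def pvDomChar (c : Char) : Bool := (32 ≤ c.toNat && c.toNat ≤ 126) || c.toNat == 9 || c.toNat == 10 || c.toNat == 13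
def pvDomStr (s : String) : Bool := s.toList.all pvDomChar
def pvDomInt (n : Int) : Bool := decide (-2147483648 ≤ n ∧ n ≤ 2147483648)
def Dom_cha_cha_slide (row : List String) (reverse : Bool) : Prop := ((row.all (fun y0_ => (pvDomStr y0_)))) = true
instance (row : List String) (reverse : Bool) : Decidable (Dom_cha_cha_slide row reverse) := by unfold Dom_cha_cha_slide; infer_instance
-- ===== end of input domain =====

-- B replaces A's per-rock bubble-swap loops by one pass that packs each wall-delimited
-- segment ('0'/'#' are A's walls) with its 'O'-count at the tilted end (alternative algorithm).


-- ===== PORT A =====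
-- inner while loop of the not-reverse branch: cur slides down from `cur`, swapping with
-- the cell below until cur = 0 or the cell below is '0' or '#'.  All indexing in A is
-- guard-checked in range, so `getD _ ""` is exact.
def pvSlideL (row : List String) (cur : Nat) : List String :=
  match cur with
  | 0 => row
  | p + 1 =>
    let nxt := row.getD p ""
    if nxt == "0" || nxt == "#" then row
    else pvSlideL ((row.set (p + 1) nxt).set p (row.getD (p + 1) "")) p

-- inner while loop of the reverse branch: cur slides up, swapping with the cell above.
def pvSlideR (row : List String) (cur : Nat) : List String :=
  if h : cur + 1 < row.length then
    let nxt := row.getD (cur + 1) ""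
    if nxt == "0" || nxt == "#" then row
    else pvSlideR ((row.set cur nxt).set (cur + 1) (row.getD cur "")) (cur + 1)
  else row
termination_by row.length - cur
decreasing_by simp only [List.length_set]; omega

def cha_cha_slide (row : List String) (reverse : Bool) : List String :=
  if !reverse then
    (List.range row.length).foldl (fun r i => if r.getD i "" == "O" then pvSlideL r i else r) row
  else
    -- range(len(row)-1, -1, -1) is the indices of row in descending order
    (List.range row.length).reverse.foldl (fun r i => if r.getD i "" == "O" then pvSlideR r i else r) row

-- ===== PORT B =====
def pvIsWall (c : String) : Bool := c == "0" || c == "#"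

-- flush(): emit one wall-delimited segment in packed form
def pvPack (seg : List String) (reverse : Bool) : List String :=
  let os := List.replicate (seg.count "O") "O"
  let rest := seg.filter (fun c => !(c == "O"))
  if reverse then rest ++ os else os ++ rest

-- the single pass over the row, `seg` is the pending segment accumulator
def pvGoB (reverse : Bool) (seg : List String) : List String → List String
  | [] => pvPack seg reverse
  | c :: rest =>
    if pvIsWall c then pvPack seg reverse ++ c :: pvGoB reverse [] rest
    else pvGoB reverse (seg ++ [c]) rest

def cha_cha_slide_alt (row : List String) (reverse : Bool) : List String :=
  pvGoB reverse [] row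

-- ===== PRECONDITION & SPEC =====
def Spec_cha_cha_slide (row : List String) (reverse : Bool) (out : List String) : Prop := out = cha_cha_slide_alt row reverse
instance (row : List String) (reverse : Bool) (out : List String) : Decidable (Spec_cha_cha_slide row reverse out) := by unfold Spec_cha_cha_slide; infer_instance

-- ===== CLAIM (what is proved, stated in full; the proofs are below) =====
def Claim_equal_cha_cha_slide : Prop := ∀ (row : List String) (reverse : Bool), Dom_cha_cha_slide row reverse → Spec_cha_cha_slide row reverse (cha_cha_slide row reverse)

-- ===== LEMMAS AND PROOFS =====

-- the two step functions of A's outer loops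
def pvStepL (r : List String) (i : Nat) : List String := if r.getD i "" == "O" then pvSlideL r i else r
def pvStepR (r : List String) (i : Nat) : List String := if r.getD i "" == "O" then pvSlideR r i else r

theorem pvGetD_shift (a t : List String) (j : Nat) : (a ++ t).getD (a.length + j) "" = t.getD j "" := by
  simp [List.getD, List.getElem?_append_right]

theorem pvSet_shift (a t : List String) (j : Nat) (x : String) :
    (a ++ t).set (a.length + j) x = a ++ t.set j x := by
  rw [List.set_append_right] <;> simp

theorem pvGetD_shiftw (pre : List String) (w : String) (suf : List String) (j : Nat) :
    (pre ++ w :: suf).getD (pre.length + 1 + j) "" = suf.getD j "" := by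
  rw [show pre ++ w :: suf = (pre ++ [w]) ++ suf by simp,
    show pre.length + 1 + j = (pre ++ [w]).length + j by simp, pvGetD_shift]

theorem pvSet_shiftw (pre : List String) (w : String) (suf : List String) (j : Nat) (x : String) :
    (pre ++ w :: suf).set (pre.length + 1 + j) x = pre ++ w :: suf.set j x := by
  rw [show pre ++ w :: suf = (pre ++ [w]) ++ suf by simp,
    show pre.length + 1 + j = (pre ++ [w]).length + j by simp, pvSet_shift]
  simp

theorem pvSlideL_length (row : List String) (cur : Nat) : (pvSlideL row cur).length = row.length := by
  induction cur generalizing row with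
  | zero => rfl
  | succ p ih =>
    rw [pvSlideL]
    split
    · rfl
    · rw [ih]; simp

theorem pvSlideR_length (row : List String) (cur : Nat) : (pvSlideR row cur).length = row.length := by
  induction row, cur using pvSlideR.induct with
  | case1 row cur h nxt hw => rw [pvSlideR, dif_pos h, if_pos hw]
  | case2 row cur h nxt hw ih => rw [pvSlideR, dif_pos h, if_neg hw, ih]; simp
  | case3 row cur h => rw [pvSlideR, dif_neg h]

theorem pvStepL_length (r : List String) (i : Nat) : (pvStepL r i).length = r.length := by
  unfold pvStepL; split <;> simp [pvSlideL_length]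

theorem pvStepR_length (r : List String) (i : Nat) : (pvStepR r i).length = r.length := by
  unfold pvStepR; split <;> simp [pvSlideR_length]

-- slides below index a.length only touch the prefix
theorem pvSlideL_localize (a t : List String) (i : Nat) (h : i < a.length) :
    pvSlideL (a ++ t) i = pvSlideL a i ++ t := by
  induction i generalizing a with
  | zero => rfl
  | succ p ih =>
    rw [pvSlideL, pvSlideL]
    rw [List.getD_append a t "" p (by omega)]
    split
    · rfl
    · rw [List.getD_append a t "" (p+1) h,
        List.set_append_left _ _ h, List.set_append_left _ _ (by simp; omega)]
      exact ih _ (by simp; omega)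

theorem pvStepL_localize (a t : List String) (i : Nat) (h : i < a.length) :
    pvStepL (a ++ t) i = pvStepL a i ++ t := by
  unfold pvStepL
  rw [List.getD_append _ _ _ _ h, pvSlideL_localize a t i h]
  split <;> rfl

-- a left slide over a wall-free prefix carries the element to the very front
theorem pvSlideL_front (a t : List String) (x : String)
    (hw : ∀ y ∈ a, pvIsWall y = false) :
    pvSlideL (a ++ x :: t) a.length = x :: (a ++ t) := by
  induction a using List.reverseRecOn generalizing t with
  | nil => rfl
  | append_singleton as y ih =>
    have hy : pvIsWall y = false := hw y (by simp)
    have hwall : (y == "0" || y == "#") = false := by simpa [pvIsWall] using hy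
    rw [show (as ++ [y]) ++ x :: t = as ++ y :: x :: t by simp,
      show (as ++ [y]).length = as.length + 1 by simp, pvSlideL]
    have g1 : (as ++ y :: x :: t).getD as.length "" = y := by
      simpa using pvGetD_shift as (y :: x :: t) 0
    rw [g1, hwall]
    simp only [Bool.false_eq_true, if_false]
    have g2 : (as ++ y :: x :: t).getD (as.length + 1) "" = x := by
      simpa using pvGetD_shiftw as y (x :: t) 0
    have s1 : (as ++ y :: x :: t).set (as.length + 1) y = as ++ y :: y :: t := by
      simpa using pvSet_shiftw as y (x :: t) 0 y
    rw [g2, s1]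
    have s2 : (as ++ y :: y :: t).set as.length x = as ++ x :: y :: t := by
      simpa using pvSet_shift as (y :: y :: t) 0 x
    rw [s2, ih (y :: t) (fun z hz => hw z (by simp [hz]))]
    simp

-- left slides at index ≥ L+1 never cross the wall at position L
theorem pvSlideL_shift (pre : List String) (w : String) (suf : List String) (j : Nat)
    (hw : pvIsWall w = true) :
    pvSlideL (pre ++ w :: suf) (pre.length + 1 + j) = pre ++ w :: pvSlideL suf j := by
  have hwall : (w == "0" || w == "#") = true := by simpa [pvIsWall] using hw
  induction j generalizing suf with
  | zero =>
    have g1 : (pre ++ w :: suf).getD pre.length "" = w := by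
      simpa using pvGetD_shift pre (w :: suf) 0
    rw [show pre.length + 1 + 0 = pre.length + 1 by omega]
    conv_lhs => rw [pvSlideL]
    rw [g1, hwall]
    simp [pvSlideL]
  | succ j ih =>
    rw [show pre.length + 1 + (j + 1) = (pre.length + 1 + j) + 1 by omega, pvSlideL]
    conv_rhs => rw [pvSlideL]
    rw [pvGetD_shiftw pre w suf j]
    split
    · rfl
    · rw [show pre.length + 1 + j + 1 = pre.length + 1 + (j + 1) by omega,
        pvGetD_shiftw pre w suf (j+1), pvSet_shiftw pre w suf (j+1),
        pvSet_shiftw pre w _ j]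
      exact ih _

theorem pvStepL_shift (pre : List String) (w : String) (suf : List String) (j : Nat)
    (hw : pvIsWall w = true) :
    pvStepL (pre ++ w :: suf) (pre.length + 1 + j) = pre ++ w :: pvStepL suf j := by
  unfold pvStepL
  rw [pvGetD_shiftw pre w suf j]
  split
  · exact pvSlideL_shift pre w suf j hw
  · rfl

-- folds of A's left step over low indices only touch the prefix
theorem pvFoldL_localize (idxs : List Nat) (L : Nat) (hidx : ∀ i ∈ idxs, i < L) :
    ∀ a t : List String, a.length = L →
      idxs.foldl pvStepL (a ++ t) = idxs.foldl pvStepL a ++ t := by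
  induction idxs with
  | nil => intro a t _; rfl
  | cons i is ih =>
    intro a t ha
    simp only [List.foldl_cons]
    rw [pvStepL_localize a t i (by rw [ha]; exact hidx i (by simp)),
      ih (fun k hk => hidx k (by simp [hk])) _ t (by rw [pvStepL_length, ha])]

-- folds of A's left step over indices beyond a wall leave prefix and wall alone
theorem pvFoldL_shift (js : List Nat) (L : Nat) :
    ∀ (pre : List String) (w : String) (suf : List String), pre.length = L → pvIsWall w = true →
      (js.map (fun j => L + 1 + j)).foldl pvStepL (pre ++ w :: suf) =
        pre ++ w :: js.foldl pvStepL suf := by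
  induction js with
  | nil => intro pre w suf _ _; rfl
  | cons j js ih =>
    intro pre w suf hl hw
    simp only [List.map_cons, List.foldl_cons]
    rw [← hl, pvStepL_shift pre w suf j hw, hl, ih pre w _ hl hw]

-- A's whole left pass on a wall-free row packs the O's at the front
theorem pvFoldL_pack (s : List String) (hw : ∀ y ∈ s, pvIsWall y = false) :
    (List.range s.length).foldl pvStepL s =
      List.replicate (s.count "O") "O" ++ s.filter (fun c => !(c == "O")) := by
  induction s using List.reverseRecOn with
  | nil => rfl
  | append_singleton s' x ih =>
    have hw' : ∀ y ∈ s', pvIsWall y = false := fun y hy => hw y (by simp [hy])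
    have hlen : (List.replicate (s'.count "O") "O" ++ s'.filter (fun c => !(c == "O"))).length
        = s'.length := by
      have := List.length_eq_length_filter_add (l := s') (fun c => (c == "O"))
      simp [List.count_eq_length_filter]
      omega
    rw [show (s' ++ [x]).length = s'.length + 1 by simp, List.range_succ, List.foldl_append,
      pvFoldL_localize (List.range s'.length) s'.length (by simp) s' [x] rfl, ih hw']
    set k := s'.count "O" with hk
    set m := s'.filter (fun c => !(c == "O")) with hm
    simp only [List.foldl_cons, List.foldl_nil]
    unfold pvStepL
    have g : (List.replicate k "O" ++ m ++ [x]).getD s'.length "" = x := by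
      have h0 := pvGetD_shift (List.replicate k "O" ++ m) [x] 0
      rw [hlen] at h0
      simpa using h0
    rw [g]
    have hmw : ∀ y ∈ List.replicate k "O" ++ m, pvIsWall y = false := by
      intro y hy
      rcases List.mem_append.mp hy with h1 | h2
      · rw [List.eq_of_mem_replicate h1]; decide
      · exact hw' y (List.mem_of_mem_filter h2)
    by_cases hx : x = "O"
    · subst hx
      have hfront := pvSlideL_front (List.replicate k "O" ++ m) [] "O" hmw
      rw [hlen] at hfront
      simp only [show ("O" == "O") = true from rfl, if_pos]
      rw [hfront]
      simp [List.count_append, List.filter_append, List.replicate_succ, ← hk, ← hm]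
    · have : (x == "O") = false := by simpa using hx
      rw [this]
      simp [List.count_append, List.filter_append, hx, ← hk, ← hm, List.append_assoc]
theorem pvFoldL_len (idxs : List Nat) (a : List String) :
    (idxs.foldl pvStepL a).length = a.length := by
  induction idxs generalizing a with
  | nil => rfl
  | cons i is ih => simp [List.foldl_cons, ih, pvStepL_length]

-- A's left pass splits at any wall
theorem pvFoldL_decomp (seg : List String) (w : String) (rest : List String)
    (hw : pvIsWall w = true) :
    (List.range (seg ++ w :: rest).length).foldl pvStepL (seg ++ w :: rest) =
      (List.range seg.length).foldl pvStepL seg ++ w ::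
        (List.range rest.length).foldl pvStepL rest := by
  have hwO : (w == "O") = false := by
    have hv : w = "0" ∨ w = "#" := by simpa [pvIsWall] using hw
    rcases hv with h | h <;> simp [h]
  rw [show (seg ++ w :: rest).length = (seg.length + 1) + rest.length by simp; omega,
    List.range_add, List.foldl_append, List.range_succ, List.foldl_append,
    pvFoldL_localize (List.range seg.length) seg.length (by simp) seg (w :: rest) rfl]
  have hLen : (List.foldl pvStepL seg (List.range seg.length)).length = seg.length :=
    pvFoldL_len _ _
  have gw : ((List.foldl pvStepL seg (List.range seg.length)) ++ w :: rest).getD seg.length "" = w := by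
    have h0 := pvGetD_shift (List.foldl pvStepL seg (List.range seg.length)) (w :: rest) 0
    rw [hLen] at h0
    simpa using h0
  have hstep : pvStepL ((List.foldl pvStepL seg (List.range seg.length)) ++ w :: rest) seg.length
      = (List.foldl pvStepL seg (List.range seg.length)) ++ w :: rest := by
    simp only [pvStepL, gw, hwO]
    simp
  simp only [List.foldl_cons, List.foldl_nil]
  rw [hstep, pvFoldL_shift (List.range rest.length) seg.length _ w rest hLen hw]

-- B: consuming a wall-free chunk just extends the accumulator
theorem pvGoB_acc (rv : Bool) (s : List String) (hw : ∀ y ∈ s, pvIsWall y = false) :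
    ∀ (acc rest : List String), pvGoB rv acc (s ++ rest) = pvGoB rv (acc ++ s) rest := by
  induction s with
  | nil => intro acc rest; simp
  | cons c s' ih =>
    intro acc rest
    have hc : pvIsWall c = false := hw c (by simp)
    rw [List.cons_append, pvGoB, if_neg (by simp [hc])]
    rw [ih (fun y hy => hw y (by simp [hy])) (acc ++ [c]) rest]
    simp

-- right-side mirrors
theorem pvSlideR_suffix_aux (k : Nat) : ∀ (pre suf : List String) (j : Nat), suf.length - j ≤ k →
    pvSlideR (pre ++ suf) (pre.length + j) = pre ++ pvSlideR suf j := by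
  induction k with
  | zero =>
    intro pre suf j hk
    rw [pvSlideR, dif_neg (by simp; omega)]
    conv_rhs => rw [pvSlideR]
    rw [dif_neg (by omega)]
  | succ k ih =>
    intro pre suf j hk
    by_cases hlt : j + 1 < suf.length
    · rw [pvSlideR, dif_pos (by simp; omega)]
      conv_rhs => rw [pvSlideR]
      rw [dif_pos hlt]
      dsimp only
      rw [show pre.length + j + 1 = pre.length + (j + 1) by omega, pvGetD_shift]
      split
      · rfl
      · rw [pvGetD_shift pre suf j, pvSet_shift pre suf j, pvSet_shift pre _ (j+1)]
        exact ih pre _ (j+1) (by simp; omega)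
    · rw [pvSlideR, dif_neg (by simp; omega)]
      conv_rhs => rw [pvSlideR]
      rw [dif_neg hlt]

theorem pvSlideR_suffix (pre suf : List String) (j : Nat) :
    pvSlideR (pre ++ suf) (pre.length + j) = pre ++ pvSlideR suf j :=
  pvSlideR_suffix_aux suf.length pre suf j (by omega)

theorem pvSlideR_back (t b : List String) (x : String)
    (hw : ∀ y ∈ b, pvIsWall y = false) :
    pvSlideR (t ++ x :: b) t.length = t ++ b ++ [x] := by
  induction b generalizing t x with
  | nil =>
    rw [pvSlideR, dif_neg (by simp)]
    simp
  | cons y b' ih =>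
    have hy : (y == "0" || y == "#") = false := by simpa [pvIsWall] using hw y (by simp)
    rw [pvSlideR, dif_pos (by simp)]
    have g1 : (t ++ x :: y :: b').getD (t.length + 1) "" = y := by
      simpa using pvGetD_shiftw t x (y :: b') 0
    rw [g1]
    dsimp only
    rw [hy]
    simp only [Bool.false_eq_true, if_false]
    have g2 : (t ++ x :: y :: b').getD t.length "" = x := by
      simpa using pvGetD_shift t (x :: y :: b') 0
    have s1 : (t ++ x :: y :: b').set t.length y = t ++ y :: y :: b' := by
      simpa using pvSet_shift t (x :: y :: b') 0 y
    have s2 : (t ++ y :: y :: b').set (t.length + 1) x = t ++ y :: x :: b' := by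
      simpa using pvSet_shiftw t y (y :: b') 0 x
    rw [g2, s1, s2]
    have ih' := ih (t ++ [y]) x (fun z hz => hw z (by simp [hz]))
    rw [show (t ++ [y]) ++ x :: b' = t ++ y :: x :: b' by simp,
      show (t ++ [y]).length = t.length + 1 by simp] at ih'
    rw [ih']
    simp

theorem pvSlideR_wallstop (pre : List String) (w : String) (suf : List String) (i : Nat)
    (hi : i < pre.length) (hw : pvIsWall w = true) :
    pvSlideR (pre ++ w :: suf) i = pvSlideR pre i ++ w :: suf := by
  have hwall : (w == "0" || w == "#") = true := by simpa [pvIsWall] using hw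
  obtain ⟨k, hk⟩ : ∃ k, pre.length - i ≤ k := ⟨pre.length, by omega⟩
  induction k generalizing i pre with
  | zero => omega
  | succ k ih =>
    by_cases hlt : i + 1 < pre.length
    · rw [pvSlideR, dif_pos (by simp; omega)]
      conv_rhs => rw [pvSlideR]
      rw [dif_pos hlt, List.getD_append pre (w :: suf) "" (i+1) hlt]
      dsimp only
      split
      · rfl
      · rw [List.getD_append pre (w :: suf) "" i (by omega),
          List.set_append_left _ _ (by omega), List.set_append_left _ _ (by simp; omega)]
        refine ih _ _ ?_ ?_ <;> (simp; omega)
    · have hi1 : i + 1 = pre.length := by omega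
      rw [pvSlideR, dif_pos (by simp; omega)]
      have g1 : (pre ++ w :: suf).getD (i + 1) "" = w := by
        rw [hi1]
        simpa using pvGetD_shift pre (w :: suf) 0
      rw [g1]
      dsimp only
      rw [hwall]
      conv_rhs => rw [pvSlideR]
      rw [dif_neg hlt]
      simp

theorem pvStepR_suffix (pre suf : List String) (j : Nat) :
    pvStepR (pre ++ suf) (pre.length + j) = pre ++ pvStepR suf j := by
  unfold pvStepR
  rw [pvGetD_shift pre suf j]
  split
  · exact pvSlideR_suffix pre suf j
  · rfl

theorem pvFoldR_suffix (idxs : List Nat) :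
    ∀ (pre suf : List String),
      (idxs.map (fun j => pre.length + j)).foldl pvStepR (pre ++ suf) =
        pre ++ idxs.foldl pvStepR suf := by
  induction idxs with
  | nil => intro pre suf; rfl
  | cons j js ih =>
    intro pre suf
    simp only [List.map_cons, List.foldl_cons]
    rw [pvStepR_suffix pre suf j, ih pre _]

theorem pvFoldR_prefix (idxs : List Nat) (L : Nat) (hidx : ∀ i ∈ idxs, i < L) :
    ∀ (pre : List String) (w : String) (suf : List String), pre.length = L → pvIsWall w = true →
      idxs.foldl pvStepR (pre ++ w :: suf) = idxs.foldl pvStepR pre ++ w :: suf := by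
  induction idxs with
  | nil => intro pre w suf _ _; rfl
  | cons i is ih =>
    intro pre w suf hl hww
    have hi : i < pre.length := by rw [hl]; exact hidx i (by simp)
    simp only [List.foldl_cons]
    have hstep : pvStepR (pre ++ w :: suf) i = pvStepR pre i ++ w :: suf := by
      unfold pvStepR
      rw [List.getD_append pre (w :: suf) "" i hi]
      split
      · exact pvSlideR_wallstop pre w suf i hi hww
      · rfl
    rw [hstep, ih (fun k hk => hidx k (by simp [hk])) _ w suf (by rw [pvStepR_length, hl]) hww]

theorem pvFoldR_pack (s : List String) (hw : ∀ y ∈ s, pvIsWall y = false) :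
    (List.range s.length).reverse.foldl pvStepR s =
      s.filter (fun c => !(c == "O")) ++ List.replicate (s.count "O") "O" := by
  induction s with
  | nil => rfl
  | cons x s' ih =>
    have hw' : ∀ y ∈ s', pvIsWall y = false := fun y hy => hw y (by simp [hy])
    set k := s'.count "O" with hk
    set m := s'.filter (fun c => !(c == "O")) with hm
    have hrev : (List.range (s'.length + 1)).reverse
        = (List.range s'.length).reverse.map (fun j => List.length [x] + j) ++ [0] := by
      rw [List.range_succ_eq_map, List.reverse_cons, ← List.map_reverse]
      congr 1
      apply List.map_congr_left
      intro a _
      simp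
      omega
    rw [show (x :: s').length = s'.length + 1 by simp, hrev, List.foldl_append,
      show x :: s' = [x] ++ s' from rfl, pvFoldR_suffix, ih hw']
    simp only [List.foldl_cons, List.foldl_nil]
    have hmw : ∀ y ∈ m ++ List.replicate k "O", pvIsWall y = false := by
      intro y hy
      rcases List.mem_append.mp hy with h1 | h2
      · exact hw' y (List.mem_of_mem_filter h1)
      · rw [List.eq_of_mem_replicate h2]; decide
    have g0 : ([x] ++ (m ++ List.replicate k "O")).getD 0 "" = x := by simp [List.getD]
    by_cases hx : x = "O"
    · subst hx
      have hback := pvSlideR_back [] (m ++ List.replicate k "O") "O" hmw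
      simp only [List.nil_append, List.length_nil] at hback
      unfold pvStepR
      rw [g0]
      simp only [show ("O" == "O") = true from rfl, if_pos]
      rw [show [("O" : String)] ++ (m ++ List.replicate k "O") = ("O" : String) :: (m ++ List.replicate k "O") from rfl, hback]
      simp [List.count_cons, List.replicate_succ', ← hk, ← hm, List.append_assoc]
    · have hxO : (x == "O") = false := by simpa using hx
      unfold pvStepR
      rw [g0, hxO]
      simp [List.filter_cons, List.count_cons, hx, hxO, ← hk, ← hm]

theorem pvFoldR_decomp (seg : List String) (w : String) (rest : List String)
    (hw : pvIsWall w = true) :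
    (List.range (seg ++ w :: rest).length).reverse.foldl pvStepR (seg ++ w :: rest) =
      (List.range seg.length).reverse.foldl pvStepR seg ++ w ::
        (List.range rest.length).reverse.foldl pvStepR rest := by
  have hwO : (w == "O") = false := by
    have hv : w = "0" ∨ w = "#" := by simpa [pvIsWall] using hw
    rcases hv with h | h <;> simp [h]
  have hrev : (List.range ((seg.length + 1) + rest.length)).reverse
      = (List.range rest.length).reverse.map (fun j => List.length (seg ++ [w]) + j)
        ++ (seg.length :: (List.range seg.length).reverse) := by
    rw [List.range_add, List.reverse_append, ← List.map_reverse, List.range_succ,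
      List.reverse_append]
    congr 1
    apply List.map_congr_left
    intro a _
    simp
  rw [show (seg ++ w :: rest).length = (seg.length + 1) + rest.length by simp; omega,
    hrev, List.foldl_append,
    show seg ++ w :: rest = (seg ++ [w]) ++ rest by simp,
    pvFoldR_suffix ((List.range rest.length).reverse) (seg ++ [w]) rest,
    show (seg ++ [w]) ++ (List.range rest.length).reverse.foldl pvStepR rest
      = seg ++ w :: (List.range rest.length).reverse.foldl pvStepR rest by simp]
  simp only [List.foldl_cons]
  have hstep : pvStepR (seg ++ w :: (List.range rest.length).reverse.foldl pvStepR rest) seg.length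
      = seg ++ w :: (List.range rest.length).reverse.foldl pvStepR rest := by
    have gw2 : (seg ++ w :: (List.range rest.length).reverse.foldl pvStepR rest).getD seg.length "" = w := by
      simpa using pvGetD_shift seg (w :: (List.range rest.length).reverse.foldl pvStepR rest) 0
    simp only [pvStepR, gw2, hwO]
    simp
  rw [hstep, pvFoldR_prefix ((List.range seg.length).reverse) seg.length (by simp) seg w _ rfl hw]

theorem pvDropWhile_head_not (p : String → Bool) (l : List String) (w : String) (tl : List String)
    (h : l.dropWhile p = w :: tl) : p w = false := by
  induction l with
  | nil => simp at h
  | cons a l ih =>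
    by_cases hp : p a
    · rw [List.dropWhile_cons_of_pos hp] at h
      exact ih h
    · rw [List.dropWhile_cons_of_neg hp] at h
      cases h
      simpa using hp

-- main inductions (strong induction on length, splitting at the first wall)
theorem pvMainL : ∀ (n : Nat) (s : List String), s.length ≤ n →
    (List.range s.length).foldl pvStepL s = pvGoB false [] s := by
  intro n
  induction n with
  | zero =>
    intro s hs
    have hs0 : s = [] := List.length_eq_zero_iff.mp (by omega)
    subst hs0
    rfl
  | succ n ih =>
    intro s hs
    by_cases hall : ∀ y ∈ s, pvIsWall y = false
    · rw [pvFoldL_pack s hall]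
      have h0 := pvGoB_acc false s hall [] []
      simp only [List.nil_append, List.append_nil] at h0
      rw [h0, pvGoB, pvPack]
      simp
    · match hdw : s.dropWhile (fun c => !pvIsWall c) with
      | [] =>
        exfalso
        apply hall
        intro y hy
        have : s.takeWhile (fun c => !pvIsWall c) = s := by
          have := List.takeWhile_append_dropWhile (p := fun c => !pvIsWall c) (l := s)
          rw [hdw] at this
          simpa using this
        have := List.mem_takeWhile_imp (l := s) (p := fun c => !pvIsWall c) (this ▸ hy)
        simpa using this
      | w :: tl =>
        have hw : pvIsWall w = true := by
          have := pvDropWhile_head_not (fun c => !pvIsWall c) s w tl hdw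
          simpa using this
        have hseg : ∀ y ∈ s.takeWhile (fun c => !pvIsWall c), pvIsWall y = false := by
          intro y hy
          simpa using List.mem_takeWhile_imp hy
        have hsplit : s = s.takeWhile (fun c => !pvIsWall c) ++ w :: tl := by
          rw [← hdw, List.takeWhile_append_dropWhile]
        have htl : tl.length ≤ n := by
          have h1 : s.length = (s.takeWhile (fun c => !pvIsWall c)).length + (w :: tl).length := by
            conv_lhs => rw [hsplit]
            simp
          simp only [List.length_cons] at h1
          omega
        rw [hsplit, pvFoldL_decomp _ w tl hw, pvFoldL_pack _ hseg, ih tl htl]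
        have h0 := pvGoB_acc false (s.takeWhile (fun c => !pvIsWall c)) hseg [] (w :: tl)
        simp only [List.nil_append] at h0
        rw [h0, pvGoB, if_pos hw, pvPack]
        simp

theorem pvMainR : ∀ (n : Nat) (s : List String), s.length ≤ n →
    (List.range s.length).reverse.foldl pvStepR s = pvGoB true [] s := by
  intro n
  induction n with
  | zero =>
    intro s hs
    have hs0 : s = [] := List.length_eq_zero_iff.mp (by omega)
    subst hs0
    rfl
  | succ n ih =>
    intro s hs
    by_cases hall : ∀ y ∈ s, pvIsWall y = false
    · rw [pvFoldR_pack s hall]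
      have h0 := pvGoB_acc true s hall [] []
      simp only [List.nil_append, List.append_nil] at h0
      rw [h0, pvGoB, pvPack]
      simp
    · match hdw : s.dropWhile (fun c => !pvIsWall c) with
      | [] =>
        exfalso
        apply hall
        intro y hy
        have : s.takeWhile (fun c => !pvIsWall c) = s := by
          have := List.takeWhile_append_dropWhile (p := fun c => !pvIsWall c) (l := s)
          rw [hdw] at this
          simpa using this
        have := List.mem_takeWhile_imp (l := s) (p := fun c => !pvIsWall c) (this ▸ hy)
        simpa using this
      | w :: tl =>
        have hw : pvIsWall w = true := by
          have := pvDropWhile_head_not (fun c => !pvIsWall c) s w tl hdw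
          simpa using this
        have hseg : ∀ y ∈ s.takeWhile (fun c => !pvIsWall c), pvIsWall y = false := by
          intro y hy
          simpa using List.mem_takeWhile_imp hy
        have hsplit : s = s.takeWhile (fun c => !pvIsWall c) ++ w :: tl := by
          rw [← hdw, List.takeWhile_append_dropWhile]
        have htl : tl.length ≤ n := by
          have h1 : s.length = (s.takeWhile (fun c => !pvIsWall c)).length + (w :: tl).length := by
            conv_lhs => rw [hsplit]
            simp
          simp only [List.length_cons] at h1
          omega
        rw [hsplit, pvFoldR_decomp _ w tl hw, pvFoldR_pack _ hseg, ih tl htl]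
        have h0 := pvGoB_acc true (s.takeWhile (fun c => !pvIsWall c)) hseg [] (w :: tl)
        simp only [List.nil_append] at h0
        rw [h0, pvGoB, if_pos hw, pvPack]
        simp

-- ===== VERDICT (by name: the statement is the Claim_ definition above) =====
theorem cha_cha_slide_spec : Claim_equal_cha_cha_slide := by
  intro row reverse _
  unfold Spec_cha_cha_slide cha_cha_slide cha_cha_slide_alt
  cases reverse with
  | false => exact pvMainL row.length row le_rfl
  | true => exact pvMainR row.length row le_rfl
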